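-- pv_equiv track=rewrite | github.com/shanest/responsive-verbs | verbs.py | intersecting_cells
-- ===== SOURCE A (Python) =====
-- def complement(part, num_worlds):
--     """Complement of a list of lists, with respect to range(num_worlds).  If
--     the list of lists is a genuine partition, this will return a tuple
--     containing the empty tuple.  Otherwise, a length-1 tuple with the
--     complement worlds in it.
--
--     This can be seen as inquisitive negation.
--
--     Args:
--         part: partition, list of lists
--         num_worlds: range(num_worlds) is the set of worlds for complementing
--
--     Returns:
--         a length 1 tuple, with a tuple of all worlds not in part
--     """
--     worlds = range(num_worlds)
--     in_part = set([item for cell in part for item in cell])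
--     return (tuple([world for world in worlds if world not in in_part]),)
--
-- def fill_in_partition(part, num_worlds):
--     """Turn a declarative meaning P into the polar question ?P.
--
--     Args:
--         part: a partition
--         num_worlds: number of worlds
--
--     Returns:
--         part if complement is trivial, (part, complement[part]) otherwise
--     """
--     comp = complement(part, num_worlds)
--     return part + comp if len(comp[0]) > 0 else part
--
-- def index_of_elt(part, elt):
--     """Get the index of the cell containing an element.
--
--     Args:
--         part: partition
--         elt: element
--
--     Returns:
--         i such that elt is in part[i]
--
--     Raises:
--         ValueError, if elt is not in part
--     """
--     for idx in range(len(part)):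
--         if elt in part[idx]:
--             return idx
--     raise ValueError("{} not in {}".format(elt, part))
--
-- def intersecting_cells(partition, dox_w):
--     """ Get all cells of partition that intersect with dox_w. """
--     cells = set()
--     num_worlds = len(dox_w)
--     partition = fill_in_partition(partition, num_worlds)
--     for world in range(num_worlds):
--         if dox_w[world]:
--             cells.add(partition[index_of_elt(partition, world)])
--     return cells
-- ===== SOURCE B (Python) =====
-- def intersecting_cells(partition, dox_w):
--     """ Get all cells of partition that intersect with dox_w. """
--     num_worlds = len(dox_w)
--     # one pass over the partition: first cell containing each element
--     first_cell = {}
--     for cell in partition: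
--         for w in cell:
--             if w not in first_cell:
--                 first_cell[w] = tuple(cell)
--     # the complement cell: worlds covered by no cell of the partition
--     rest = tuple(w for w in range(num_worlds) if w not in first_cell)
--     cells = set()
--     for w in range(num_worlds):
--         if dox_w[w]:
--             cells.add(first_cell.get(w, rest))
--     return cells
-- ===== Notes on version B (the rewrite author's own statement) =====
-- stated objective: faster
-- what changed: B replaces A's per-world linear scan (index_of_elt) through the filled partition by a first-containing-cell dictionary built in one pass over the partition, with the complement cell used as the lookup default, so fill_in_partition's concatenation and the inner scan disappear.
import Mathlib
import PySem

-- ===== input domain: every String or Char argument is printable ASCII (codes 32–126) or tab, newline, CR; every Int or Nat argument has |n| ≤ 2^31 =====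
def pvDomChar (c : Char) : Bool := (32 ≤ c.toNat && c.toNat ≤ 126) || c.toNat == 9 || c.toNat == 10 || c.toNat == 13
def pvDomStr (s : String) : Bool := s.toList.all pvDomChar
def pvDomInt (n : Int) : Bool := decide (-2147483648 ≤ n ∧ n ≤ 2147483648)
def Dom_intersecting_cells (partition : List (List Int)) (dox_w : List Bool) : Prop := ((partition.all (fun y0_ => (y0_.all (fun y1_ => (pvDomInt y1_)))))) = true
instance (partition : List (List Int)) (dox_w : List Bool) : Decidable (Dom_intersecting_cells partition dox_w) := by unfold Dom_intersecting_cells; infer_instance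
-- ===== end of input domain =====

-- B replaces A's per-world linear scan through the (filled) partition by a first-containing-cell
-- dictionary built in one pass over the partition (objective: faster).

-- ===== PORT A =====
-- complement(part, num_worlds) returns a 1-tuple holding one cell; we port that single cell.
def pyComplement (part : List (List Int)) (num_worlds : Int) : List Int :=
  let in_part : PySem.Set Int := PySem.Set.ofList (part.flatMap (fun cell => cell))
  (PySem.List.pyRange 0 num_worlds 1).filter (fun world => !(PySem.Set.contains in_part world))

def pyFillInPartition (part : List (List Int)) (num_worlds : Int) : List (List Int) :=
  let comp := pyComplement part num_worlds
  if comp.length > 0 then part ++ [comp] else part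

-- the 'for idx in range(len(part))' loop of index_of_elt, with early return; none = ValueError
def indexOfEltGo (elt : Int) : Nat → List (List Int) → Option Nat
  | _, [] => none
  | idx, c :: rest => if c.contains elt then some idx else indexOfEltGo elt (idx + 1) rest

def indexOfElt (part : List (List Int)) (elt : Int) : Option Nat := indexOfEltGo elt 0 part

def intersecting_cells (partition : List (List Int)) (dox_w : List Bool) : List (List Int) :=
  let num_worlds : Int := dox_w.length
  let part := pyFillInPartition partition num_worlds
  (PySem.List.pyRange 0 num_worlds 1).foldl
    (fun cells world =>
      if PySem.List.pyGetD dox_w world false then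
        match indexOfElt part world with
        | some i => PySem.Set.add cells (PySem.List.pyGetD part (Int.ofNat i) [])
        | none => cells  -- unreachable (would be ValueError): the filled partition covers every world
      else cells)
    PySem.Set.empty

-- ===== PORT B =====
def intersecting_cells_alt (partition : List (List Int)) (dox_w : List Bool) : List (List Int) :=
  let num_worlds : Int := dox_w.length
  let first_cell : PySem.Dict Int (List Int) :=
    partition.foldl
      (fun d cell => cell.foldl (fun d w => if d.contains w then d else d.insert w cell) d)
      PySem.Dict.empty
  let rest : List Int :=
    (PySem.List.pyRange 0 num_worlds 1).filter (fun w => !(first_cell.contains w))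
  (PySem.List.pyRange 0 num_worlds 1).foldl
    (fun cells w =>
      if PySem.List.pyGetD dox_w w false then
        PySem.Set.add cells (first_cell.getD w rest)
      else cells)
    PySem.Set.empty

-- ===== PRECONDITION & SPEC =====
def Spec_intersecting_cells (partition : List (List Int)) (dox_w : List Bool) (out : List (List Int)) : Prop := out = intersecting_cells_alt partition dox_w
instance (partition : List (List Int)) (dox_w : List Bool) (out : List (List Int)) : Decidable (Spec_intersecting_cells partition dox_w out) := by unfold Spec_intersecting_cells; infer_instance

-- ===== CLAIM (what is proved, stated in full; the proofs are below) =====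
def Claim_equal_intersecting_cells : Prop := ∀ (partition : List (List Int)) (dox_w : List Bool), Dom_intersecting_cells partition dox_w → Spec_intersecting_cells partition dox_w (intersecting_cells partition dox_w)

-- ===== LEMMAS AND PROOFS =====

-- A's index lookup followed by indexing is exactly 'first cell containing elt'.
theorem indexOfEltGo_lookup (elt : Int) (ps : List (List Int)) : ∀ (pre : List (List Int)),
    (match indexOfEltGo elt pre.length ps with
     | some i => some (PySem.List.pyGetD (pre ++ ps) (Int.ofNat i) [])
     | none => (none : Option (List Int)))
    = ps.find? (fun c => c.contains elt) := by
  induction ps with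
  | nil => intro pre; simp [indexOfEltGo]
  | cons c rest ih =>
    intro pre
    by_cases h : elt ∈ c
    · have hget : PySem.List.pyGetD (pre ++ c :: rest) (Int.ofNat pre.length) [] = c := by
        rw [show (Int.ofNat pre.length) = ((pre.length : Nat) : Int) from rfl,
            PySem.List.pyGetD_natCast]
        simp [List.getD]
      simp only [indexOfEltGo, List.elem_eq_contains.symm, List.contains_iff_mem, h, if_true,
        List.find?_cons, decide_true]
      rw [hget]
      simp [List.elem_eq_mem, h]
    · have ihx := ih (pre ++ [c])
      simp only [List.length_append, List.length_cons, List.length_nil, List.append_assoc,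
        List.cons_append, List.nil_append, Nat.add_zero] at ihx
      simp only [indexOfEltGo, List.contains_iff_mem, h, if_false, Bool.false_eq_true] at ihx ⊢
      rw [ihx, List.find?_cons]
      simp [h]

-- B's dictionary lookup is exactly 'first cell containing elt'.
theorem innerFold_get? (elt : Int) (cell : List Int) : ∀ (ws : List Int) (d : PySem.Dict Int (List Int)),
    (ws.foldl (fun d w => if d.contains w then d else d.insert w cell) d).get? elt
    = if d.contains elt then d.get? elt else (if ws.contains elt then some cell else none) := by
  intro ws
  induction ws with
  | nil => intro d; by_cases h : d.contains elt <;> simp [h, PySem.Dict.get?_eq_none_iff_contains]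
  | cons w ws ih =>
    intro d
    simp only [List.foldl_cons]
    by_cases hw : d.contains w
    · rw [if_pos hw, ih d]
      by_cases he : d.contains elt
      · simp [he]
      · rcases eq_or_ne elt w with rfl | hew
        · exact absurd hw he
        · simp [he, List.contains_cons, hew]
    · rw [if_neg hw, ih (d.insert w cell)]
      rcases eq_or_ne elt w with rfl | hew
      · simp [PySem.Dict.contains_insert_self, PySem.Dict.get?_insert_self, hw, List.contains_cons]
      · have hc : (d.insert w cell).contains elt = d.contains elt := by
          simp [PySem.Dict.contains_insert, hew]
        rw [hc, PySem.Dict.get?_insert_of_ne d cell hew]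
        by_cases he : d.contains elt
        · simp [he]
        · simp [he, List.contains_cons, hew]

theorem build_get? (elt : Int) (parts : List (List Int)) : ∀ (d : PySem.Dict Int (List Int)),
    (parts.foldl (fun d cell => cell.foldl (fun d w => if d.contains w then d else d.insert w cell) d) d).get? elt
    = if d.contains elt then d.get? elt else parts.find? (fun c => c.contains elt) := by
  induction parts with
  | nil => intro d; by_cases h : d.contains elt <;> simp [h, PySem.Dict.get?_eq_none_iff_contains]
  | cons c rest ih =>
    intro d
    simp only [List.foldl_cons]
    rw [ih, innerFold_get? elt c c d]
    by_cases he : d.contains elt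
    · have hcon : (c.foldl (fun d w => if d.contains w then d else d.insert w c) d).contains elt = true := by
        rw [PySem.Dict.contains_eq_isSome_get?, innerFold_get? elt c c d, if_pos he,
          ← PySem.Dict.contains_eq_isSome_get?, he]
      simp [hcon, he]
    · by_cases hc : c.contains elt
      · have hm : elt ∈ c := by simpa using hc
        have hcon : (c.foldl (fun d w => if d.contains w then d else d.insert w c) d).contains elt = true := by
          rw [PySem.Dict.contains_eq_isSome_get?, innerFold_get? elt c c d, if_neg he, if_pos hc]
          rfl
        simp [hcon, he, hc, List.find?_cons, hm]
      · have hm : elt ∉ c := by simpa using hc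
        have hcon : (c.foldl (fun d w => if d.contains w then d else d.insert w c) d).contains elt = false := by
          rw [PySem.Dict.contains_eq_isSome_get?, innerFold_get? elt c c d, if_neg he, if_neg hc]
          rfl
        simp [hcon, he, List.find?_cons, hm]

-- abbreviation for B's dictionary (proof-side only)
def buildFC (partition : List (List Int)) : PySem.Dict Int (List Int) :=
  partition.foldl
    (fun d cell => cell.foldl (fun d w => if d.contains w then d else d.insert w cell) d)
    PySem.Dict.empty

theorem buildFC_get? (partition : List (List Int)) (w : Int) :
    (buildFC partition).get? w = partition.find? (fun c => c.contains w) := by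
  rw [buildFC, build_get?]
  simp [PySem.Dict.contains_empty]

theorem buildFC_contains (partition : List (List Int)) (w : Int) :
    (buildFC partition).contains w = (partition.find? (fun c => c.contains w)).isSome := by
  rw [PySem.Dict.contains_eq_isSome_get?, buildFC_get?]

theorem find?_isSome_iff_mem_flatMap (partition : List (List Int)) (w : Int) :
    (partition.find? (fun c => c.contains w)).isSome ↔ w ∈ partition.flatMap (fun cell => cell) := by
  rw [List.find?_isSome, List.mem_flatMap]
  constructor
  · rintro ⟨c, hc, hw⟩; exact ⟨c, hc, by simpa using hw⟩
  · rintro ⟨c, hc, hw⟩; exact ⟨c, hc, by simpa using hw⟩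

theorem rest_eq_comp (partition : List (List Int)) (n : Int) :
    (PySem.List.pyRange 0 n 1).filter (fun w => !((buildFC partition).contains w))
    = pyComplement partition n := by
  rw [pyComplement]
  apply List.filter_congr
  intro w _
  have : (buildFC partition).contains w
      = PySem.Set.contains (PySem.Set.ofList (partition.flatMap (fun cell => cell))) w := by
    rw [buildFC_contains, Bool.eq_iff_iff, find?_isSome_iff_mem_flatMap]
    rw [PySem.Set.contains_iff, PySem.Set.mem_ofList]
  rw [this]

-- at every in-range world, the cell A picks is the cell B looks up
theorem find?_filled (partition : List (List Int)) (n w : Int) (h0 : 0 ≤ w) (hn : w < n) :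
    (pyFillInPartition partition n).find? (fun c => c.contains w)
    = some ((buildFC partition).getD w
        ((PySem.List.pyRange 0 n 1).filter (fun v => !((buildFC partition).contains v)))) := by
  rw [PySem.Dict.getD_eq_get?_getD, buildFC_get?, rest_eq_comp, pyFillInPartition]
  rcases hf : partition.find? (fun c => c.contains w) with _ | v
  · -- no cell of partition contains w: A finds the complement cell, B defaults to it
    have hnotmem : w ∉ partition.flatMap (fun cell => cell) := by
      intro hm
      have := (find?_isSome_iff_mem_flatMap partition w).mpr hm
      rw [hf] at this; simp at this
    have hwc : w ∈ pyComplement partition n := by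
      rw [pyComplement]
      refine List.mem_filter.mpr ⟨PySem.List.mem_pyRange_one.mpr ⟨h0, hn⟩, ?_⟩
      simp only [Bool.not_eq_eq_eq_not, Bool.not_true, ← Bool.not_eq_true]
      intro hcon
      exact hnotmem ((PySem.Set.mem_ofList _ _).mp ((PySem.Set.contains_iff _ _).mp hcon))
    have hne : (pyComplement partition n).length > 0 := List.length_pos_of_mem hwc
    rw [if_pos hne, List.find?_append, hf]
    simp [hwc]
  · -- some cell of partition contains w: it is the first such cell on both sides
    rw [hf]
    simp only [Option.getD_some]
    split
    · rw [List.find?_append, hf, Option.some_or]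
    · exact hf

theorem one_world (partition : List (List Int)) (dox_w : List Bool) (w : Int)
    (h0 : 0 ≤ w) (hn : w < (dox_w.length : Int)) (acc : List (List Int)) :
    (match indexOfElt (pyFillInPartition partition (dox_w.length : Int)) w with
     | some i => PySem.Set.add acc
         (PySem.List.pyGetD (pyFillInPartition partition (dox_w.length : Int)) (Int.ofNat i) [])
     | none => acc)
    = PySem.Set.add acc ((buildFC partition).getD w
        ((PySem.List.pyRange 0 (dox_w.length : Int) 1).filter (fun v => !((buildFC partition).contains v)))) := by
  have hlook := indexOfEltGo_lookup w (pyFillInPartition partition (dox_w.length : Int)) []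
  rw [List.nil_append] at hlook
  rw [find?_filled partition (dox_w.length : Int) w h0 hn] at hlook
  rcases hA : indexOfElt (pyFillInPartition partition (dox_w.length : Int)) w with _ | i
  · rw [indexOfElt] at hA
    rw [show ([] : List (List Int)).length = 0 from rfl, hA] at hlook
    simp at hlook
  · rw [indexOfElt] at hA
    rw [show ([] : List (List Int)).length = 0 from rfl, hA] at hlook
    simp only [Option.some.injEq] at hlook
    show PySem.Set.add acc
        (PySem.List.pyGetD (pyFillInPartition partition (dox_w.length : Int)) (Int.ofNat i) []) = _
    rw [hlook]

-- ===== VERDICT (by name: the statement is the Claim_ definition above) =====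
theorem intersecting_cells_spec : Claim_equal_intersecting_cells := by
  intro partition dox_w _
  unfold Spec_intersecting_cells intersecting_cells intersecting_cells_alt
  simp only []
  rw [show (partition.foldl
        (fun d cell => cell.foldl (fun d w => if d.contains w then d else d.insert w cell) d)
        PySem.Dict.empty) = buildFC partition from rfl]
  apply PySem.List.foldl_congr_mem
  intro acc w hw
  rcases PySem.List.mem_pyRange_one.mp hw with ⟨h0, hn⟩
  by_cases hd : PySem.List.pyGetD dox_w w false
  · rw [if_pos hd, if_pos hd]
    exact one_world partition dox_w w h0 hn acc
  · rw [if_neg hd, if_neg hd]
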